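-- pv_equiv track=rewrite | github.com/lefticus/cppstdmd | generate_stable_name_aliases.py | build_bidirectional_map
-- ===== SOURCE A (Python) =====
-- def build_bidirectional_map(aliases: dict[str, str]) -> dict[str, list[str]]:
--     """Build a map where each name knows all its aliases (past and future).
--
--     Returns a dict where each key maps to a list of all equivalent names.
--     """
--     # Group all equivalent names
--     groups: dict[str, set[str]] = {}
--
--     for old_name, new_name in aliases.items():
--         # Find or create group for these names
--         group_key = None
--         for key, names in groups.items():
--             if old_name in names or new_name in names:
--                 group_key = key
--                 break
--
--         if group_key is None:
--             group_key = new_name  # Use newest name as key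
--             groups[group_key] = set()
--
--         groups[group_key].add(old_name)
--         groups[group_key].add(new_name)
--
--     # Convert to list format and include all bidirectional mappings
--     result: dict[str, list[str]] = {}
--     for group_key, names in groups.items():
--         names_list = sorted(names)
--         for name in names_list:
--             # Each name maps to all OTHER equivalent names
--             result[name] = [n for n in names_list if n != name]
--
--     return result
-- ===== SOURCE B (Python) =====
-- def build_bidirectional_map(aliases: dict[str, str]) -> dict[str, list[str]]:
--     """Build a map where each name knows all its aliases (past and future).
--
--     Returns a dict where each key maps to a list of all equivalent names.
--     """
--     # Groups kept as a list of sets; for each name, the index of the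
--     # earliest group that contains it, so no scan over groups is needed.
--     groups: list[set[str]] = []
--     earliest: dict[str, int] = {}
--
--     for old_name, new_name in aliases.items():
--         cands = [earliest[n] for n in (old_name, new_name) if n in earliest]
--         if cands:
--             gid = min(cands)
--         else:
--             gid = len(groups)
--             groups.append(set())
--         for n in (old_name, new_name):
--             groups[gid].add(n)
--             earliest[n] = min(earliest.get(n, gid), gid)
--
--     result: dict[str, list[str]] = {}
--     for names in groups:
--         names_list = sorted(names)
--         for name in names_list:
--             result[name] = [n for n in names_list if n != name]
--     return result
-- ===== Notes on version B (the rewrite author's own statement) =====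
-- stated objective: faster
-- what changed: A scans all existing groups (a dict keyed by names) for each alias pair; B keeps groups as a list of sets plus a per-name map to the earliest group index containing it, so the group for a pair is found by two O(1) lookups instead of a scan over all groups.
import Mathlib
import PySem

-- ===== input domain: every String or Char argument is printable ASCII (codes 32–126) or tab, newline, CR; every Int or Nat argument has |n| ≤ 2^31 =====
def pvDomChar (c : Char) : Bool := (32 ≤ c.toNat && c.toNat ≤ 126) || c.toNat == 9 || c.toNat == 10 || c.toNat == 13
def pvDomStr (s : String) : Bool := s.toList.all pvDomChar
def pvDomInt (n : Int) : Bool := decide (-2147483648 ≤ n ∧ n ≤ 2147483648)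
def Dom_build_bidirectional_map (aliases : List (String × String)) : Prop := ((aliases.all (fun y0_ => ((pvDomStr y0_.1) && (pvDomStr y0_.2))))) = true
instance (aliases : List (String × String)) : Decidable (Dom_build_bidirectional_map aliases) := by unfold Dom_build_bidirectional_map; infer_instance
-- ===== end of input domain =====

-- B replaces A's linear scan over all groups by a per-name map to the earliest group index
-- (groups kept as a list of sets), an asymptotically faster algorithm with the same output.


-- ===== PORT A =====
-- the inner 'for key, names in groups.items(): if old in names or new in names: break'
def pvAFindKey (items : List (String × PySem.Set String)) (oldn newn : String) : Option String :=
  match items with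
  | [] => none
  | (k, names) :: rest =>
    if PySem.Set.contains names oldn || PySem.Set.contains names newn then some k
    else pvAFindKey rest oldn newn

-- one iteration of A's main loop over aliases.items()
def pvAStep (groups : PySem.Dict String (PySem.Set String)) (p : String × String) :
    PySem.Dict String (PySem.Set String) :=
  let kg :=
    match pvAFindKey groups.items p.1 p.2 with
    | some k => (k, groups)
    | none => (p.2, groups.insert p.2 PySem.Set.empty)
  kg.2.modify kg.1 PySem.Set.empty (fun s => PySem.Set.add (PySem.Set.add s p.1) p.2)

-- A's second loop: build the result dict from groups.items()
def pvAResult (gs : List (String × PySem.Set String)) : PySem.Dict String (List String) :=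
  gs.foldl (fun r kv =>
    let nl := PySem.List.sorted kv.2 (fun x => x)
    nl.foldl (fun r name => r.insert name (nl.filter (fun n => n != name))) r)
    PySem.Dict.empty

def build_bidirectional_map (aliases : List (String × String)) : List (String × List String) :=
  let groups := ((PySem.Dict.ofList aliases).items).foldl pvAStep PySem.Dict.empty
  (pvAResult groups.items).items

-- ===== PORT B =====
-- one iteration of B's main loop: groups is a list of sets, earliest maps a name to the
-- index of the earliest group containing it
def pvBStep (groups : List (PySem.Set String)) (earliest : PySem.Dict String Nat)
    (p : String × String) : List (PySem.Set String) × PySem.Dict String Nat :=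
  let cands := [p.1, p.2].filterMap (fun n => earliest.get? n)
  let gg :=
    match PySem.List.min? cands (fun x => x) with
    | some g => (g, groups)
    | none => (groups.length, groups ++ [PySem.Set.empty])
  [p.1, p.2].foldl
    (fun st n =>
      (st.1.set gg.1 (PySem.Set.add (st.1.getD gg.1 PySem.Set.empty) n),
       st.2.insert n (min (st.2.getD n gg.1) gg.1)))
    (gg.2, earliest)

-- B's second loop: build the result dict from the list of groups
def pvBResult (gs : List (PySem.Set String)) : PySem.Dict String (List String) :=
  gs.foldl (fun r names =>
    let nl := PySem.List.sorted names (fun x => x)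
    nl.foldl (fun r name => r.insert name (nl.filter (fun n => n != name))) r)
    PySem.Dict.empty

def build_bidirectional_map_alt (aliases : List (String × String)) : List (String × List String) :=
  let st := ((PySem.Dict.ofList aliases).items).foldl (fun st p => pvBStep st.1 st.2 p)
    ([], PySem.Dict.empty)
  (pvBResult st.1).items

-- ===== PRECONDITION & SPEC =====
def Spec_build_bidirectional_map (aliases : List (String × String)) (out : List (String × List String)) : Prop := out = build_bidirectional_map_alt aliases
instance (aliases : List (String × String)) (out : List (String × List String)) : Decidable (Spec_build_bidirectional_map aliases out) := by unfold Spec_build_bidirectional_map; infer_instance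

-- ===== CLAIM (what is proved, stated in full; the proofs are below) =====
def Claim_equal_build_bidirectional_map : Prop := ∀ (aliases : List (String × String)), Dom_build_bidirectional_map aliases → Spec_build_bidirectional_map aliases (build_bidirectional_map aliases)

-- ===== LEMMAS AND PROOFS =====

lemma pv_findKey_none_iff (items : List (String × PySem.Set String)) (o n : String) :
    pvAFindKey items o n = none ↔
      (items.map Prod.snd).findIdx?
        (fun s => PySem.Set.contains s o || PySem.Set.contains s n) = none := by
  induction items with
  | nil => simp [pvAFindKey]
  | cons kv rest ih =>
      obtain ⟨k, names⟩ := kv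
      simp only [pvAFindKey, List.map_cons, List.findIdx?_cons]
      cases hc : (PySem.Set.contains names o || PySem.Set.contains names n) <;>
        simp only [hc, reduceIte, Bool.false_eq_true, if_false, if_true, ih] <;> simp

lemma pv_findKey_of_findIdx (items : List (String × PySem.Set String)) (o n : String) (i : Nat)
    (h : (items.map Prod.snd).findIdx?
        (fun s => PySem.Set.contains s o || PySem.Set.contains s n) = some i) :
    ∃ hi : i < items.length, pvAFindKey items o n = some (items[i].1) := by
  induction items generalizing i with
  | nil => simp at h
  | cons kv rest ih =>
      obtain ⟨k, names⟩ := kv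
      simp only [List.map_cons, List.findIdx?_cons] at h
      cases hc : (PySem.Set.contains names o || PySem.Set.contains names n) with
      | true =>
          rw [hc] at h
          simp only [reduceIte] at h
          have hi0 : i = 0 := by exact (Option.some_inj.1 h).symm
          subst hi0
          refine ⟨by simp, ?_⟩
          simp only [pvAFindKey, hc, reduceIte]
          simp
      | false =>
          rw [hc] at h
          simp only [Bool.false_eq_true, if_false, Option.map_eq_some_iff] at h
          obtain ⟨j, hj, hji⟩ := h
          obtain ⟨hlt, hfk⟩ := ih j hj
          subst hji
          refine ⟨by simpa using Nat.succ_lt_succ hlt, ?_⟩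
          simp only [pvAFindKey, hc, Bool.false_eq_true, if_false]
          simpa using hfk

lemma pv_insert_at (d : PySem.Dict String (PySem.Set String)) (k : String)
    (v : PySem.Set String) (i : Nat) (hi : i < d.items.length)
    (hk : (d.items[i]).1 = k) (hnd : (d.items.map Prod.fst).Nodup) :
    (d.insert k v).items = d.items.set i (k, v) := by
  have hc : d.contains k = true := by
    simp only [PySem.Dict.contains, List.any_eq_true]
    exact ⟨d.items[i], List.getElem_mem hi, by simp [hk]⟩
  simp only [PySem.Dict.insert, hc, if_true]
  apply List.ext_getElem
  · simp
  · intro j hj hj'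
    have hjlen : j < d.items.length := by simpa using hj
    by_cases hij : j = i
    · subst hij
      simp [List.getElem_set, hk]
    · have hne : (d.items[j]).1 ≠ k := by
        intro he
        have hjm : j < (d.items.map Prod.fst).length := by simpa using hjlen
        have him : i < (d.items.map Prod.fst).length := by simpa using hi
        have h1 : (d.items.map Prod.fst)[j]'hjm = (d.items.map Prod.fst)[i]'him := by
          simp [he, hk]
        exact hij (hnd.getElem_inj_iff.1 h1)
      simp [List.getElem_set, hne, Ne.symm hij]

lemma pv_getD_at (d : PySem.Dict String (PySem.Set String)) (k : String) (i : Nat)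
    (hi : i < d.items.length) (hk : (d.items[i]).1 = k)
    (hnd : (d.items.map Prod.fst).Nodup) (dflt : PySem.Set String) :
    d.getD k dflt = (d.items[i]).2 := by
  have hmem : (k, (d.items[i]).2) ∈ d.items := by
    have heq : d.items[i] = (k, (d.items[i]).2) := by
      rw [Prod.ext_iff]; exact ⟨hk, rfl⟩
    rw [← heq]; exact List.getElem_mem hi
  exact PySem.Dict.getD_of_mem_items d hmem (show (d.items.map Prod.fst).Nodup from hnd) dflt

def pvLeast (gs : List (PySem.Set String)) (n : String) : Option Nat :=
  gs.findIdx? (fun s => PySem.Set.contains s n)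

def pvMinO (o : Option Nat) (i : Nat) : Nat :=
  match o with
  | none => i
  | some j => min j i

lemma pv_contains_add (s : PySem.Set String) (x y : String) :
    PySem.Set.contains (PySem.Set.add s x) y = (PySem.Set.contains s y || y == x) := by
  simp only [PySem.Set.add, PySem.Set.contains]
  by_cases h : List.contains s x
  · rw [if_pos h]
    by_cases hyx : y = x
    · subst hyx; simp_all
    · simp [hyx]
  · rw [if_neg h]
    by_cases hyx : y = x <;> simp [List.contains_append, hyx]

lemma pv_least_set_add2 (gs : List (PySem.Set String)) (gid : Nat) (hgid : gid < gs.length)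
    (a b n : String) :
    pvLeast (gs.set gid (PySem.Set.add (PySem.Set.add gs[gid] a) b)) n =
      (if n = a ∨ n = b then some (pvMinO (pvLeast gs n) gid) else pvLeast gs n) := by
  set t := PySem.Set.add (PySem.Set.add gs[gid] a) b with ht
  have hct : PySem.Set.contains t n = (PySem.Set.contains gs[gid] n || n == a || n == b) := by
    rw [ht, pv_contains_add, pv_contains_add]
  have hlen : (gs.set gid t).length = gs.length := by simp
  by_cases hab : n = a ∨ n = b
  · have hctt : PySem.Set.contains t n = true := by
      rw [hct]
      rcases hab with h | h <;> simp [h]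
    rw [if_pos hab]
    rcases hj : pvLeast gs n with _ | j
    · have hnone := List.findIdx?_eq_none_iff.1 hj
      simp only [pvMinO]
      apply List.findIdx?_eq_some_iff_getElem.2
      refine ⟨by rw [hlen]; omega, ?_, ?_⟩
      · have he : (gs.set gid t)[gid]'(by rw [hlen]; omega) = t := by simp
        rw [he]; exact hctt
      · intro l hl
        have hlg : l ≠ gid := by omega
        have hlt : l < gs.length := by omega
        have he : (gs.set gid t)[l]'(by rw [hlen]; omega) = gs[l] := by
          rw [List.getElem_set]; simp [Ne.symm hlg]
        rw [he]
        simp only [Bool.not_eq_true]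
        exact hnone gs[l] (List.getElem_mem hlt)
    · obtain ⟨hjl, hpj, hmin⟩ := List.findIdx?_eq_some_iff_getElem.1 hj
      have hjlen : j < gs.length := by simpa using hjl
      apply List.findIdx?_eq_some_iff_getElem.2
      refine ⟨by rw [hlen]; simp [pvMinO]; omega, ?_, ?_⟩
      · by_cases hjg : j < gid
        · have h1 : pvMinO (some j) gid = j := by simp [pvMinO]; omega
          have he : (gs.set gid t)[pvMinO (some j) gid]'(by rw [hlen]; simp [pvMinO]; omega) = gs[j] := by
            rw [List.getElem_set]; simp [h1]; omega
          rw [he]; exact hpj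
        · have h1 : pvMinO (some j) gid = gid := by simp [pvMinO]; omega
          have he : (gs.set gid t)[pvMinO (some j) gid]'(by rw [hlen]; simp [pvMinO]; omega) = t := by
            rw [List.getElem_set]; simp [h1]
          rw [he]; exact hctt
      · intro l hl
        have hl' : l < min j gid := by simpa [pvMinO] using hl
        have hlg : l ≠ gid := by omega
        have hlj : l < j := by omega
        have he : (gs.set gid t)[l]'(by rw [hlen]; omega) = gs[l] := by
          rw [List.getElem_set]; simp [Ne.symm hlg]
        rw [he]
        exact hmin l (by simpa using hlj)
  · rw [if_neg hab]
    push_neg at hab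
    have hcu : PySem.Set.contains t n = PySem.Set.contains gs[gid] n := by
      rw [hct]
      have h1 : (n == a) = false := beq_eq_false_iff_ne.2 hab.1
      have h2 : (n == b) = false := beq_eq_false_iff_ne.2 hab.2
      rw [h1, h2]; simp
    rcases hj : pvLeast gs n with _ | j
    · have hnone := List.findIdx?_eq_none_iff.1 hj
      apply List.findIdx?_eq_none_iff.2
      intro s hs
      rcases List.mem_or_eq_of_mem_set hs with h | h
      · exact hnone s h
      · subst h
        rw [hcu]
        simp only [Bool.not_eq_true] at *
        exact hnone gs[gid] (List.getElem_mem hgid)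
    · obtain ⟨hjl, hpj, hmin⟩ := List.findIdx?_eq_some_iff_getElem.1 hj
      have hjlen : j < gs.length := by simpa using hjl
      apply List.findIdx?_eq_some_iff_getElem.2
      refine ⟨by rw [hlen]; omega, ?_, ?_⟩
      · by_cases hjg : j = gid
        · subst hjg
          have he : (gs.set j t)[j]'(by rw [hlen]; omega) = t := by simp
          rw [he, hcu]
          exact hpj
        · have he : (gs.set gid t)[j]'(by rw [hlen]; omega) = gs[j] := by
            rw [List.getElem_set]; simp [Ne.symm hjg]
          rw [he]; exact hpj
      · intro l hl
        by_cases hlg : l = gid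
        · subst hlg
          have he : (gs.set l t)[l]'(by rw [hlen]; omega) = t := by simp
          rw [he, hcu]
          exact hmin l (by omega)
        · have he : (gs.set gid t)[l]'(by rw [hlen]; omega) = gs[l] := by
            rw [List.getElem_set]; simp [Ne.symm hlg]
          rw [he]
          exact hmin l (by omega)

lemma pv_findIdx_or (q1 q2 : PySem.Set String → Bool) (gs : List (PySem.Set String)) :
    gs.findIdx? (fun s => q1 s || q2 s) =
      match gs.findIdx? q1, gs.findIdx? q2 with
      | none, b => b
      | some a, none => some a
      | some a, some b => some (min a b) := by
  induction gs with
  | nil => simp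
  | cons s gs ih =>
      by_cases h1 : q1 s <;> by_cases h2 : q2 s <;>
        simp [List.findIdx?_cons, h1, h2, ih] <;>
        rcases hq1 : gs.findIdx? q1 with _ | a <;> rcases hq2 : gs.findIdx? q2 with _ | b <;>
          simp <;> omega

lemma pv_least_append_empty (gs : List (PySem.Set String)) (n : String) :
    pvLeast (gs ++ [PySem.Set.empty]) n = pvLeast gs n := by
  simp [pvLeast, List.findIdx?_append, PySem.Set.empty, PySem.Set.contains]

def pvInv (d : PySem.Dict String (PySem.Set String)) (gs : List (PySem.Set String))
    (e : PySem.Dict String Nat) : Prop :=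
  d.items.map Prod.snd = gs ∧
  (d.items.map Prod.fst).Nodup ∧
  (∀ kv ∈ d.items, PySem.Set.contains kv.2 kv.1 = true) ∧
  (∀ n, e.get? n = pvLeast gs n)

lemma pv_b_fold (gs0 : List (PySem.Set String)) (e : PySem.Dict String Nat) (gid : Nat)
    (hgid : gid < gs0.length) (p1 p2 : String) :
    [p1, p2].foldl
      (fun st n =>
        (st.1.set gid (PySem.Set.add (st.1.getD gid PySem.Set.empty) n),
         st.2.insert n (min (st.2.getD n gid) gid)))
      (gs0, e) =
    (gs0.set gid (PySem.Set.add (PySem.Set.add gs0[gid] p1) p2),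
     (e.insert p1 (min (e.getD p1 gid) gid)).insert p2
       (min ((e.insert p1 (min (e.getD p1 gid) gid)).getD p2 gid) gid)) := by
  simp only [List.foldl]
  have h1 : gs0.getD gid PySem.Set.empty = gs0[gid] := by
    rw [List.getD_eq_getElem?_getD, List.getElem?_eq_getElem hgid]; rfl
  have h2 : (gs0.set gid (PySem.Set.add gs0[gid] p1)).getD gid PySem.Set.empty
      = PySem.Set.add gs0[gid] p1 := by
    rw [List.getD_eq_getElem?_getD, List.getElem?_set_self (by omega)]; rfl
  rw [h1, h2, List.set_set]

-- B's transition on the earliest-index dict matches the new least-index function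

lemma pv_e2 (e : PySem.Dict String Nat) (gs gs0 : List (PySem.Set String)) (gid : Nat)
    (p1 p2 : String)
    (h4 : ∀ n, e.get? n = pvLeast gs n)
    (hgs0 : ∀ n, pvLeast gs0 n = pvLeast gs n)
    (hgid : gid < gs0.length) :
    ∀ n, ((e.insert p1 (min (e.getD p1 gid) gid)).insert p2
        (min ((e.insert p1 (min (e.getD p1 gid) gid)).getD p2 gid) gid)).get? n =
      pvLeast (gs0.set gid (PySem.Set.add (PySem.Set.add gs0[gid] p1) p2)) n := by
  intro n
  rw [pv_least_set_add2 gs0 gid hgid p1 p2 n, hgs0]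
  have hv1 : min (e.getD p1 gid) gid = pvMinO (pvLeast gs p1) gid := by
    rw [PySem.Dict.getD_eq_get?_getD, h4]
    rcases pvLeast gs p1 with _ | j <;> simp [pvMinO]
  by_cases hn2 : p2 = n
  · subst hn2
    rw [PySem.Dict.get?_insert_self, if_pos (Or.inr rfl)]
    by_cases h21 : p2 = p1
    · rw [h21, PySem.Dict.getD_eq_get?_getD, PySem.Dict.get?_insert_self]
      simp only [Option.getD_some]
      rw [hv1]
      rcases pvLeast gs p1 with _ | j <;> simp [pvMinO] <;> omega
    · rw [PySem.Dict.getD_eq_get?_getD, PySem.Dict.get?_insert_of_ne _ _ h21,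
        ← PySem.Dict.getD_eq_get?_getD, PySem.Dict.getD_eq_get?_getD, h4]
      rcases pvLeast gs p2 with _ | j <;> simp [pvMinO]
  · rw [PySem.Dict.get?_insert_of_ne _ _ (fun h => hn2 h.symm)]
    by_cases hn1 : p1 = n
    · subst hn1
      rw [PySem.Dict.get?_insert_self, if_pos (Or.inl rfl), hv1]
    · rw [PySem.Dict.get?_insert_of_ne _ _ (fun h => hn1 h.symm),
        if_neg (by rintro (h | h); exacts [hn1 h.symm, hn2 h.symm]), h4]

lemma pv_set_append {α : Type} (l : List α) (x y : α) :
    (l ++ [x]).set l.length y = l ++ [y] := by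
  apply List.ext_getElem
  · simp
  · intro j hj hj'
    have hjl : j < l.length + 1 := by simpa using hj
    by_cases hje : j = l.length
    · subst hje
      rw [List.getElem_set]
      simp [List.getElem_concat_length]
    · have hjlt : j < l.length := by omega
      rw [List.getElem_set]
      simp only [if_neg (Ne.symm hje)]
      rw [List.getElem_append_left hjlt, List.getElem_append_left hjlt]

lemma pv_step_found (d : PySem.Dict String (PySem.Set String)) (gs : List (PySem.Set String))
    (e : PySem.Dict String Nat) (p : String × String) (i : Nat)
    (h1 : d.items.map Prod.snd = gs) (h2 : (d.items.map Prod.fst).Nodup)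
    (h3 : ∀ kv ∈ d.items, PySem.Set.contains kv.2 kv.1 = true)
    (h4 : ∀ n, e.get? n = pvLeast gs n)
    (hsome : gs.findIdx? (fun s => PySem.Set.contains s p.1 || PySem.Set.contains s p.2) = some i)
    (hBmin : PySem.List.min? ([p.1, p.2].filterMap (fun n => e.get? n)) (fun x => x) = some i) :
    pvInv (pvAStep d p) (pvBStep gs e p).1 (pvBStep gs e p).2 := by
  have hlen : d.items.length = gs.length := by rw [← h1]; simp
  have higs : i < gs.length := by
    obtain ⟨hi, -, -⟩ := List.findIdx?_eq_some_iff_getElem.1 hsome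
    exact hi
  have hi : i < d.items.length := by omega
  -- A's scan finds the key at index i
  obtain ⟨hi', hfk⟩ := pv_findKey_of_findIdx d.items p.1 p.2 i (by rw [h1]; exact hsome)
  set k := (d.items[i]'hi').1 with hk
  have hvi : (d.items[i]'hi').2 = gs[i] := by
    have hmi : i < (d.items.map Prod.snd).length := by simpa using hi'
    have h' := List.getElem_of_eq h1 hmi
    simpa using h'
  -- A's step rewrites entry i
  have hA : (pvAStep d p).items = d.items.set i (k, PySem.Set.add (PySem.Set.add gs[i] p.1) p.2) := by
    simp only [pvAStep, hfk, PySem.Dict.modify]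
    rw [pv_getD_at d k i hi' rfl h2, hvi]
    exact pv_insert_at d k _ i hi' rfl h2
  -- B's step
  have hB : pvBStep gs e p =
      (gs.set i (PySem.Set.add (PySem.Set.add gs[i] p.1) p.2),
       (e.insert p.1 (min (e.getD p.1 i) i)).insert p.2
         (min ((e.insert p.1 (min (e.getD p.1 i) i)).getD p.2 i) i)) := by
    simp only [pvBStep, hBmin]
    exact pv_b_fold gs e i higs p.1 p.2
  rw [hB]
  refine ⟨?_, ?_, ?_, ?_⟩
  · rw [hA, List.map_set, h1]
  · rw [hA, List.map_set]
    have : (d.items.map Prod.fst).set i k = d.items.map Prod.fst := by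
      have him : i < (d.items.map Prod.fst).length := by simpa using hi'
      have : (d.items.map Prod.fst)[i]'him = k := by simp [hk]
      rw [← this]
      exact List.set_getElem_self him
    rw [this]; exact h2
  · rw [hA]
    intro kv hkv
    rcases List.mem_or_eq_of_mem_set hkv with hm | hm
    · exact h3 kv hm
    · subst hm
      simp only [pv_contains_add]
      have hck : PySem.Set.contains gs[i] k = true := by
        rw [← hvi]
        exact h3 _ (List.getElem_mem hi')
      have hmemk : k ∈ gs[i] := (PySem.Set.contains_iff _ _).1 hck
      simp [hmemk]
  · exact pv_e2 e gs gs i p.1 p.2 h4 (fun n => rfl) higs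

lemma pv_step (d : PySem.Dict String (PySem.Set String)) (gs : List (PySem.Set String))
    (e : PySem.Dict String Nat) (p : String × String) (h : pvInv d gs e) :
    pvInv (pvAStep d p) (pvBStep gs e p).1 (pvBStep gs e p).2 := by
  obtain ⟨h1, h2, h3, h4⟩ := h
  have hor := pv_findIdx_or (fun s => PySem.Set.contains s p.1)
    (fun s => PySem.Set.contains s p.2) gs
  rcases ho1 : gs.findIdx? (fun s => PySem.Set.contains s p.1) with _ | a <;>
    rcases ho2 : gs.findIdx? (fun s => PySem.Set.contains s p.2) with _ | b
  case none.none =>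
    -- no group contains either name: A appends a fresh group keyed by p.2, B appends a fresh set
    rw [ho1, ho2] at hor
    have hno2 := List.findIdx?_eq_none_iff.1 ho2
    have e1 : e.get? p.1 = none := by rw [h4]; exact ho1
    have e2 : e.get? p.2 = none := by rw [h4]; exact ho2
    have hcands : [p.1, p.2].filterMap (fun n => e.get? n) = [] := by
      simp [List.filterMap_cons, e1, e2]
    have hfkN : pvAFindKey d.items p.1 p.2 = none := by
      apply (pv_findKey_none_iff d.items p.1 p.2).2
      rw [h1, hor]
    have hnc : d.contains p.2 = false := by
      rw [← Bool.not_eq_true, PySem.Dict.contains, List.any_eq_true]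
      rintro ⟨kv, hkv, hbeq⟩
      have hkeq : kv.1 = p.2 := by simpa using hbeq
      have hc2 := h3 kv hkv
      rw [hkeq] at hc2
      have hmem : kv.2 ∈ gs := by rw [← h1]; exact List.mem_map_of_mem hkv
      rw [hno2 kv.2 hmem] at hc2
      exact Bool.false_ne_true hc2
    have hd1 : (d.insert p.2 PySem.Set.empty).items = d.items ++ [(p.2, PySem.Set.empty)] :=
      PySem.Dict.items_insert_of_not_contains d PySem.Set.empty hnc
    have hlend : d.items.length < (d.insert p.2 PySem.Set.empty).items.length := by
      rw [hd1]; simp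
    have hkey1 : ((d.insert p.2 PySem.Set.empty).items[d.items.length]'hlend) =
        (p.2, PySem.Set.empty) := by
      have := List.getElem_of_eq hd1 hlend
      rw [this]
      exact List.getElem_concat_length rfl _
    have hfresh : p.2 ∉ d.items.map Prod.fst := by
      intro hm
      obtain ⟨kv, hkv, hfst⟩ := List.mem_map.1 hm
      have hctr : d.contains p.2 = true := by
        rw [PySem.Dict.contains, List.any_eq_true]
        exact ⟨kv, hkv, by simp [hfst]⟩
      rw [hnc] at hctr
      exact Bool.false_ne_true hctr
    have hnd1 : ((d.insert p.2 PySem.Set.empty).items.map Prod.fst).Nodup := by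
      rw [hd1]
      simp only [List.map_append, List.map_cons, List.map_nil]
      rw [List.nodup_append]
      exact ⟨h2, by simp, by
        intro x hx y hy he
        subst he
        have hxy : x = p.2 := by simpa using hy
        exact hfresh (hxy ▸ hx)⟩
    have hA : (pvAStep d p).items =
        d.items ++ [(p.2, PySem.Set.add (PySem.Set.add PySem.Set.empty p.1) p.2)] := by
      simp only [pvAStep, hfkN, PySem.Dict.modify]
      have hg : (d.insert p.2 PySem.Set.empty).getD p.2 PySem.Set.empty = PySem.Set.empty := by
        have := pv_getD_at (d.insert p.2 PySem.Set.empty) p.2 d.items.length hlend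
          (by rw [hkey1]) hnd1 PySem.Set.empty
        rw [this, hkey1]
      rw [hg]
      rw [pv_insert_at (d.insert p.2 PySem.Set.empty) p.2 _ d.items.length hlend
        (by rw [hkey1]) hnd1]
      rw [hd1, pv_set_append]
    have hgid : gs.length < (gs ++ [PySem.Set.empty]).length := by simp
    have hB : pvBStep gs e p =
        ((gs ++ [PySem.Set.empty]).set gs.length
           (PySem.Set.add (PySem.Set.add ((gs ++ [PySem.Set.empty])[gs.length]'hgid) p.1) p.2),
         (e.insert p.1 (min (e.getD p.1 gs.length) gs.length)).insert p.2
           (min ((e.insert p.1 (min (e.getD p.1 gs.length) gs.length)).getD p.2 gs.length)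
             gs.length)) := by
      simp only [pvBStep, hcands]
      exact pv_b_fold (gs ++ [PySem.Set.empty]) e gs.length hgid p.1 p.2
    have hconv : (gs ++ [PySem.Set.empty]).set gs.length
        (PySem.Set.add (PySem.Set.add ((gs ++ [PySem.Set.empty])[gs.length]'hgid) p.1) p.2) =
        gs ++ [PySem.Set.add (PySem.Set.add PySem.Set.empty p.1) p.2] := by
      rw [List.getElem_concat_length rfl, pv_set_append]
    rw [hB]
    refine ⟨?_, ?_, ?_, ?_⟩
    · rw [hA, hconv]
      simp [h1]
    · rw [hA]
      simp only [List.map_append, List.map_cons, List.map_nil]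
      rw [List.nodup_append]
      exact ⟨h2, by simp, by
        intro x hx y hy he
        subst he
        have hxy : x = p.2 := by simpa using hy
        exact hfresh (hxy ▸ hx)⟩
    · rw [hA]
      intro kv hkv
      rcases List.mem_append.1 hkv with hm | hm
      · exact h3 kv hm
      · have hkv2 : kv = (p.2, PySem.Set.add (PySem.Set.add PySem.Set.empty p.1) p.2) := by
          simpa using hm
        subst hkv2
        simp only [pv_contains_add]
        simp
    · exact pv_e2 e gs (gs ++ [PySem.Set.empty]) gs.length p.1 p.2 h4
        (pv_least_append_empty gs) hgid
  case none.some =>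
    rw [ho1, ho2] at hor
    have e1 : e.get? p.1 = none := by rw [h4]; exact ho1
    have e2 : e.get? p.2 = some b := by rw [h4]; exact ho2
    refine pv_step_found d gs e p b h1 h2 h3 h4 hor ?_
    simp [List.filterMap_cons, e1, e2, PySem.List.min?]
  case some.none =>
    rw [ho1, ho2] at hor
    have e1 : e.get? p.1 = some a := by rw [h4]; exact ho1
    have e2 : e.get? p.2 = none := by rw [h4]; exact ho2
    refine pv_step_found d gs e p a h1 h2 h3 h4 hor ?_
    simp [List.filterMap_cons, e1, e2, PySem.List.min?]
  case some.some =>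
    rw [ho1, ho2] at hor
    have e1 : e.get? p.1 = some a := by rw [h4]; exact ho1
    have e2 : e.get? p.2 = some b := by rw [h4]; exact ho2
    refine pv_step_found d gs e p (min a b) h1 h2 h3 h4 hor ?_
    simp only [List.filterMap_cons, e1, e2, List.filterMap_nil, PySem.List.min?, List.foldl]
    split_ifs <;> (congr 1<;> omega)

lemma pv_loop (items : List (String × String)) (d : PySem.Dict String (PySem.Set String))
    (gs : List (PySem.Set String)) (e : PySem.Dict String Nat) (h : pvInv d gs e) :
    pvInv (items.foldl pvAStep d)
      (items.foldl (fun st p => pvBStep st.1 st.2 p) (gs, e)).1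
      (items.foldl (fun st p => pvBStep st.1 st.2 p) (gs, e)).2 := by
  induction items generalizing d gs e with
  | nil => exact h
  | cons p rest ih =>
      simpa using ih (pvAStep d p) (pvBStep gs e p).1 (pvBStep gs e p).2 (pv_step d gs e p h)

lemma pv_result_eq (items : List (String × PySem.Set String)) :
    pvAResult items = pvBResult (items.map Prod.snd) := by
  unfold pvAResult pvBResult
  rw [List.foldl_map]

-- ===== VERDICT (by name: the statement is the Claim_ definition above) =====
theorem build_bidirectional_map_spec : Claim_equal_build_bidirectional_map := by
  intro aliases _
  unfold Spec_build_bidirectional_map build_bidirectional_map build_bidirectional_map_alt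
  have h0 : pvInv PySem.Dict.empty [] PySem.Dict.empty := by
    refine ⟨rfl, by simp [PySem.Dict.empty], by simp [PySem.Dict.empty], ?_⟩
    intro n; simp [PySem.Dict.get?, PySem.Dict.empty, pvLeast]
  have h := pv_loop ((PySem.Dict.ofList aliases).items) PySem.Dict.empty [] PySem.Dict.empty h0
  obtain ⟨h1, -, -, -⟩ := h
  show (pvAResult (List.foldl pvAStep PySem.Dict.empty (PySem.Dict.ofList aliases).items).items).items =
    (pvBResult (List.foldl (fun st p => pvBStep st.1 st.2 p) ([], PySem.Dict.empty)
      (PySem.Dict.ofList aliases).items).1).items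
  rw [pv_result_eq, h1]
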